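-- pv_equiv track=rewrite | github.com/fraware/LabTrust-Gym | src/labtrust_gym/security/prompt_injection_defense.py | _split_verbatim_flagged
-- ===== SOURCE A (Python) =====
-- def _split_verbatim_flagged(
--     normalized_output: str,
--     normalized_sample: str,
--     min_verbatim_len: int,
--     min_segment_len: int = 2,
-- ) -> bool:
--     """
--     True if some split of normalized_sample (two contiguous segments) appears in
--     normalized_output with total length >= min_verbatim_len (PI-EVASION-SPLIT style).
--     """
--     if len(normalized_sample) < min_verbatim_len or len(normalized_output) < min_verbatim_len:
--         return False
--     # Split at every position such that both segments have at least min_segment_len chars.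
--     for i in range(min_segment_len, len(normalized_sample) - min_segment_len + 1):
--         seg1 = normalized_sample[:i]
--         seg2 = normalized_sample[i:]
--         if len(seg1) + len(seg2) < min_verbatim_len:
--             continue
--         concatenated = seg1 + seg2
--         with_space = seg1 + " " + seg2
--         if concatenated in normalized_output or with_space in normalized_output:
--             return True
--     return False
-- ===== SOURCE B (Python) =====
-- def _split_verbatim_flagged(
--     normalized_output: str,
--     normalized_sample: str,
--     min_verbatim_len: int,
--     min_segment_len: int = 2,
-- ) -> bool:
--     out, sam = normalized_output, normalized_sample
--     n, m = len(sam), len(out)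
--     if n < min_verbatim_len or m < min_verbatim_len or 2 * min_segment_len > n:
--         return False
--     # Verbatim occurrence: one substring search suffices (every split concatenates back
--     # to the sample itself).
--     if sam in out:
--         return True
--     # Effective insertion positions for the space: clamp the split range to [0, n].
--     lo = max(0, min_segment_len)
--     hi = n - lo
--     # One sliding pass over the output: at each window start, extend the common prefix
--     # with the sample; the only split that could still put a space here is j = min(k, hi).
--     for s in range(m - n):
--         k = 0
--         while k < n and out[s + k] == sam[k]:
--             k += 1
--         j = min(k, hi)
--         if j >= lo and out[s:s + n + 1] == sam[:j] + " " + sam[j:]: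
--             return True
--     return False
-- ===== Notes on version B (the rewrite author's own statement) =====
-- stated objective: alternative
-- what changed: A tries every split position and runs two substring searches over the whole output per split; B does one substring search for the verbatim case (every split concatenates back to the sample), clamps the split range to the effective insertion positions, and makes a single sliding pass over the output that extends the common prefix with the sample at each window start and tests only the one canonical spaced split j = min(prefix_len, hi) per window.
import Mathlib
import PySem

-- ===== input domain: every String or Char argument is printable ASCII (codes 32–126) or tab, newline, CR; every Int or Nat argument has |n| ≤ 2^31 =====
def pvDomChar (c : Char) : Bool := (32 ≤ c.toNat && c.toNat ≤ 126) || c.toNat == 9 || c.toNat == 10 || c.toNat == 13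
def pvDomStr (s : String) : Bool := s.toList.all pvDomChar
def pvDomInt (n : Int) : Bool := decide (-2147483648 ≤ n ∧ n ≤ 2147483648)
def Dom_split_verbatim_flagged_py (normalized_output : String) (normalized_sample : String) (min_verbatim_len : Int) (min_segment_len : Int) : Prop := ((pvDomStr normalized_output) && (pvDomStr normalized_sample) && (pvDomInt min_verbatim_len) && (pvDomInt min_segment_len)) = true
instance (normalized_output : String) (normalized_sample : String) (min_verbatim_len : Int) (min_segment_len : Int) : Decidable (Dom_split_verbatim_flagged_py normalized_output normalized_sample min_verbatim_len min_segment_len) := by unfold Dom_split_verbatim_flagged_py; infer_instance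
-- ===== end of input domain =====

-- B replaces A's loop over all splits (each doing two substring searches) by one
-- verbatim substring check plus a single sliding pass over the output that checks
-- one canonical spaced split per window (alternative algorithm).

-- ===== PORT A =====
-- literal transliteration of A: for each split position i, build both candidate
-- strings and run Python's substring test ('in' = PySem.Chars.isIn) on each.
def split_verbatim_flagged_py (normalized_output : String) (normalized_sample : String) (min_verbatim_len : Int) (min_segment_len : Int) : Bool :=
  let o := normalized_output.toList
  let sam := normalized_sample.toList
  if (sam.length : Int) < min_verbatim_len ∨ (o.length : Int) < min_verbatim_len then false
  else
    (PySem.List.pyRange min_segment_len ((sam.length : Int) - min_segment_len + 1) 1).any fun i =>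
      let seg1 := PySem.List.slice sam none (some i)
      let seg2 := PySem.List.slice sam (some i) none
      if (seg1.length : Int) + (seg2.length : Int) < min_verbatim_len then false
      else
        PySem.Chars.isIn (seg1 ++ seg2) o || PySem.Chars.isIn (seg1 ++ ' ' :: seg2) o

-- ===== PORT B =====
-- helper for B's inner 'while' loop: longest common prefix of two char lists
def pvLcp : List Char → List Char → Nat
  | x :: t, y :: a => if x == y then pvLcp t a + 1 else 0
  | _, _ => 0

-- literal transliteration of B (Source B): guard, then one pass over window starts.
def split_verbatim_flagged_py_alt (normalized_output : String) (normalized_sample : String) (min_verbatim_len : Int) (min_segment_len : Int) : Bool :=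
  let o := normalized_output.toList
  let sam := normalized_sample.toList
  let n := sam.length
  let m := o.length
  if (n : Int) < min_verbatim_len ∨ (m : Int) < min_verbatim_len ∨ 2 * min_segment_len > (n : Int) then false
  else
    if PySem.Chars.isIn sam o then true
    else
      let lo := (max 0 min_segment_len).toNat
      let hi := n - lo
      (PySem.List.pyRange 0 ((m : Int) - (n : Int)) 1).any fun si =>
        let k := pvLcp (o.drop si.toNat) sam
        let j := min k hi
        decide (lo ≤ j) && (PySem.List.slice o (some si) (some (si + (n : Int) + 1)) == sam.take j ++ ' ' :: sam.drop j)

-- ===== PRECONDITION & SPEC =====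
def Spec_split_verbatim_flagged_py (normalized_output : String) (normalized_sample : String) (min_verbatim_len : Int) (min_segment_len : Int) (out : Bool) : Prop := out = split_verbatim_flagged_py_alt normalized_output normalized_sample min_verbatim_len min_segment_len
instance (normalized_output : String) (normalized_sample : String) (min_verbatim_len : Int) (min_segment_len : Int) (out : Bool) : Decidable (Spec_split_verbatim_flagged_py normalized_output normalized_sample min_verbatim_len min_segment_len out) := by unfold Spec_split_verbatim_flagged_py; infer_instance

-- ===== CLAIM (what is proved, stated in full; the proofs are below) =====
def Claim_equal_split_verbatim_flagged_py : Prop := ∀ (normalized_output : String) (normalized_sample : String) (min_verbatim_len : Int) (min_segment_len : Int), Dom_split_verbatim_flagged_py normalized_output normalized_sample min_verbatim_len min_segment_len → Spec_split_verbatim_flagged_py normalized_output normalized_sample min_verbatim_len min_segment_len (split_verbatim_flagged_py normalized_output normalized_sample min_verbatim_len min_segment_len)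

-- ===== LEMMAS AND PROOFS =====

-- the sample with one space inserted at position j (j already clamped to [0, length])
def pvIns (s : List Char) (j : Nat) : List Char := s.take j ++ ' ' :: s.drop j

lemma pvClampIdx_eq (n : Nat) (i : Int) :
    PySem.List.clampIdx n i = if i < 0 then ((n : Int) + i).toNat else min i.toNat n := by
  simp [PySem.List.clampIdx]; split_ifs <;> omega

lemma pvSliceTo_clamp (xs : List Char) (i : Int) :
    PySem.List.slice xs none (some i) = xs.take (PySem.List.clampIdx xs.length i) := by
  by_cases h : 0 ≤ i
  · rw [PySem.List.slice_to xs h, pvClampIdx_eq, if_neg (by omega)]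
    rcases Nat.le_total i.toNat xs.length with h2 | h2
    · rw [min_eq_left h2]
    · rw [min_eq_right h2, List.take_of_length_le h2, List.take_length]
  · obtain ⟨k, hk, rfl⟩ : ∃ k : Nat, 0 < k ∧ i = -(k : Int) :=
      ⟨i.natAbs, by omega, by omega⟩
    rw [PySem.List.slice_to_neg_natCast xs k hk, pvClampIdx_eq, if_pos (by omega)]
    congr 1
    omega

lemma pvLcp_prefix_iff (t a : List Char) (j : Nat) (hj : j ≤ a.length) :
    a.take j <+: t ↔ j ≤ pvLcp t a := by
  induction t generalizing a j with
  | nil =>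
    have h0 : pvLcp [] a = 0 := by cases a <;> rfl
    rw [h0]
    constructor
    · intro h
      have := h.length_le
      simp only [List.length_take, List.length_nil] at this
      omega
    · intro h
      have hj0 : j = 0 := by omega
      subst hj0; simp
  | cons x t ih =>
    cases j with
    | zero => simp
    | succ j =>
      cases a with
      | nil => simp at hj
      | cons y a =>
        rw [show pvLcp (x :: t) (y :: a) = if x == y then pvLcp t a + 1 else 0 from rfl,
          List.take_succ_cons]
        constructor
        · intro h
          rcases List.cons_prefix_cons.mp h with ⟨rfl, h2⟩
          rw [if_pos (by simp)]
          exact Nat.succ_le_succ ((ih a j (by simpa using hj)).mp h2)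
        · intro h
          split_ifs at h with he
          · have he' : x = y := by simpa using he
            subst he'
            exact List.cons_prefix_cons.mpr ⟨rfl, (ih a j (by simpa using hj)).mpr (by omega)⟩
          · omega

lemma pvLcp_getElem? (t a : List Char) (i : Nat) (hi : i < pvLcp t a) : t[i]? = a[i]? := by
  induction t generalizing a i with
  | nil => simp [pvLcp] at hi
  | cons x t ih =>
    cases a with
    | nil => simp [pvLcp] at hi
    | cons y a =>
      rw [show pvLcp (x :: t) (y :: a) = if x == y then pvLcp t a + 1 else 0 from rfl] at hi
      split_ifs at hi with h
      · have h' : x = y := by simpa using h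
        cases i with
        | zero => simp [h']
        | succ i => simpa using ih a i (by omega)
      · omega

lemma pvIns_length (s : List Char) (j : Nat) (hj : j ≤ s.length) :
    (pvIns s j).length = s.length + 1 := by
  unfold pvIns
  rw [List.length_append, List.length_cons, List.length_take, List.length_drop]
  omega

lemma pvIns_getElem?_self (s : List Char) (j : Nat) (hj : j ≤ s.length) :
    (pvIns s j)[j]? = some ' ' := by
  unfold pvIns
  have hl : (s.take j).length = j := by simp [List.length_take]; omega
  rw [List.getElem?_append_right (by rw [hl]), hl]
  simp

lemma pvIns_succ (s : List Char) (j : Nat) (hj : j < s.length) (hsp : s[j]? = some ' ') :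
    pvIns s j = pvIns s (j + 1) := by
  unfold pvIns
  have h1 : s.take (j + 1) = s.take j ++ [' '] := by
    rw [List.take_add_one, hsp]; rfl
  have h2 : s.drop j = ' ' :: s.drop (j + 1) := by
    rw [List.drop_eq_getElem_cons hj]
    have hg : s[j] = ' ' := by
      have := List.getElem?_eq_getElem hj
      rw [hsp] at this
      exact (Option.some_injective _ this.symm)
    rw [hg]
  rw [h1, h2]
  simp

lemma pvTakePrefixIns (s t : List Char) (j : Nat) (h : pvIns s j <+: t) : s.take j <+: t := by
  unfold pvIns at h
  exact (List.prefix_append _ _).trans h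

lemma pvRaise (t s : List Char) (hi j : Nat) (hhi : hi ≤ s.length) (hj : j ≤ hi)
    (h : pvIns s j <+: t) :
    pvIns s (min (pvLcp t s) hi) <+: t := by
  obtain ⟨d, hd⟩ : ∃ d, min (pvLcp t s) hi - j = d := ⟨_, rfl⟩
  induction d generalizing j with
  | zero =>
    have hjk : j ≤ pvLcp t s :=
      (pvLcp_prefix_iff t s j (le_trans hj hhi)).mp (pvTakePrefixIns s t j h)
    have hje : j = min (pvLcp t s) hi := by omega
    subst hje
    exact h
  | succ d ih =>
    have hjk : j ≤ pvLcp t s :=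
      (pvLcp_prefix_iff t s j (le_trans hj hhi)).mp (pvTakePrefixIns s t j h)
    have hjlt : j < min (pvLcp t s) hi := by omega
    have hjk' : j < pvLcp t s := lt_of_lt_of_le hjlt (min_le_left _ _)
    have hjn : j ≤ s.length := le_trans hj hhi
    -- t[j] = ' ' from the occurrence, and t[j] = s[j] from the common prefix
    have ht : t[j]? = some ' ' := by
      obtain ⟨r, rfl⟩ := h
      rw [List.getElem?_append_left (by rw [pvIns_length s j hjn]; omega)]
      exact pvIns_getElem?_self s j hjn
    have hsj : s[j]? = some ' ' := by
      rw [← pvLcp_getElem? t s j hjk']; exact ht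
    have hjn' : j < s.length := lt_of_lt_of_le hjlt (le_trans (min_le_right _ _) hhi)
    have h' : pvIns s (j + 1) <+: t := by rw [← pvIns_succ s j hjn' hsj]; exact h
    exact ih (j + 1) (by omega) h' (by omega)

lemma pvInfix_window (l o : List Char) :
    l <:+: o ↔ ∃ u, u + l.length ≤ o.length ∧ l <+: o.drop u := by
  constructor
  · rintro ⟨pre, suf, rfl⟩
    refine ⟨pre.length, by simp, ?_⟩
    rw [List.append_assoc, List.drop_left' rfl]
    exact List.prefix_append _ _
  · rintro ⟨u, _, h⟩
    exact h.isInfix.trans (List.drop_suffix u o).isInfix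

-- image of the split range under Python's slice clamping is exactly [lo, n-lo]
lemma pvClamp_mem (n : Nat) (ms i : Int) (h2 : 2 * ms ≤ (n : Int)) (h1 : ms ≤ i)
    (h3 : i ≤ (n : Int) - ms) :
    (max 0 ms).toNat ≤ PySem.List.clampIdx n i ∧
      PySem.List.clampIdx n i ≤ n - (max 0 ms).toNat := by
  rw [pvClampIdx_eq]; split_ifs <;> constructor <;> omega

lemma pvClamp_surj (n : Nat) (ms : Int) (j : Nat) (h2 : 2 * ms ≤ (n : Int))
    (hlo : (max 0 ms).toNat ≤ j) (hhi : j ≤ n - (max 0 ms).toNat) :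
    ms ≤ (j : Int) ∧ (j : Int) ≤ (n : Int) - ms ∧ PySem.List.clampIdx n (j : Int) = j := by
  rw [pvClampIdx_eq]; split_ifs <;> refine ⟨by omega, by omega, by omega⟩

-- A's loop, characterised: the sample occurs verbatim, or some clamped split occurs spaced
lemma pvA_iff (o s : List Char) (mv ms : Int) (hmv : mv ≤ (s.length : Int))
    (hms : 2 * ms ≤ (s.length : Int)) :
    ((PySem.List.pyRange ms ((s.length : Int) - ms + 1) 1).any fun i =>
      let seg1 := PySem.List.slice s none (some i)
      let seg2 := PySem.List.slice s (some i) none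
      if (seg1.length : Int) + (seg2.length : Int) < mv then false
      else
        PySem.Chars.isIn (seg1 ++ seg2) o || PySem.Chars.isIn (seg1 ++ ' ' :: seg2) o) = true
    ↔ (s <:+: o ∨ ∃ j, (max 0 ms).toNat ≤ j ∧ j ≤ s.length - (max 0 ms).toNat ∧ pvIns s j <:+: o) := by
  have hbody : ∀ i : Int,
      ((fun i =>
        let seg1 := PySem.List.slice s none (some i)
        let seg2 := PySem.List.slice s (some i) none
        if (seg1.length : Int) + (seg2.length : Int) < mv then false
        else
          PySem.Chars.isIn (seg1 ++ seg2) o || PySem.Chars.isIn (seg1 ++ ' ' :: seg2) o) i) =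
      (PySem.Chars.isIn s o || PySem.Chars.isIn (pvIns s (PySem.List.clampIdx s.length i)) o) := by
    intro i
    have hc : PySem.List.clampIdx s.length i ≤ s.length := PySem.List.clampIdx_le _ _
    simp only [pvSliceTo_clamp, PySem.List.slice_some_none]
    rw [if_neg (by simp only [List.length_take, List.length_drop]; omega)]
    rw [List.take_append_drop]
    rfl
  simp only [List.any_eq_true, PySem.List.mem_pyRange_one, hbody, Bool.or_eq_true,
    PySem.Chars.isIn_iff_infix]
  constructor
  · rintro ⟨i, ⟨h1, h2⟩, hQ | hP⟩
    · exact Or.inl hQ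
    · refine Or.inr ⟨PySem.List.clampIdx s.length i, ?_, ?_, hP⟩
      · exact (pvClamp_mem s.length ms i hms h1 (by omega)).1
      · exact (pvClamp_mem s.length ms i hms h1 (by omega)).2
  · rintro (hQ | ⟨j, hj1, hj2, hP⟩)
    · exact ⟨ms, ⟨le_refl ms, by omega⟩, Or.inl hQ⟩
    · obtain ⟨ha, hb, hc⟩ := pvClamp_surj s.length ms j hms hj1 hj2
      exact ⟨(j : Int), ⟨ha, by omega⟩, Or.inr (by rw [hc]; exact hP)⟩

-- B's loop, characterised the same way
lemma pvB_iff (o s : List Char) (ms : Int) (hms : 2 * ms ≤ (s.length : Int)) :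
    (if PySem.Chars.isIn s o then true
      else
        (PySem.List.pyRange 0 ((o.length : Int) - (s.length : Int)) 1).any fun si =>
          let k := pvLcp (o.drop si.toNat) s
          let j := min k (s.length - (max 0 ms).toNat)
          decide ((max 0 ms).toNat ≤ j) &&
            (PySem.List.slice o (some si) (some (si + (s.length : Int) + 1)) ==
              s.take j ++ ' ' :: s.drop j)) = true
    ↔ (s <:+: o ∨ ∃ j, (max 0 ms).toNat ≤ j ∧ j ≤ s.length - (max 0 ms).toNat ∧ pvIns s j <:+: o) := by
  set n := s.length with hn
  set m := o.length with hm
  set lo := (max 0 ms).toNat with hlo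
  set hi := n - lo with hhi
  have hlon : lo ≤ n := by omega
  have hihn : hi ≤ n := by omega
  by_cases hin : PySem.Chars.isIn s o = true
  · rw [if_pos hin]
    exact ⟨fun _ => Or.inl ((PySem.Chars.isIn_iff_infix s o).mp hin), fun _ => rfl⟩
  · rw [if_neg hin]
    simp only [List.any_eq_true, PySem.List.mem_pyRange_one]
    constructor
    · rintro ⟨si, ⟨h0, h1⟩, hb⟩
      have hsiu : si = (si.toNat : Int) := by omega
      set u := si.toNat with hu
      simp only [Bool.and_eq_true, decide_eq_true_eq, beq_iff_eq] at hb
      obtain ⟨hblo, hbeq⟩ := hb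
      right
      set j := min (pvLcp (o.drop u) s) hi with hj
      have hslice : PySem.List.slice o (some si) (some (si + (n : Int) + 1)) =
          (o.drop u).take (n + 1) := by
        rw [hsiu, show ((u : Int) + (n : Int) + 1) = (u : Int) + ((n + 1 : Nat) : Int) by push_cast; ring]
        exact PySem.List.slice_natCast_add o u (n + 1)
      rw [hslice] at hbeq
      refine ⟨j, hblo, min_le_right _ _, ?_⟩
      have hpre : pvIns s j <+: o.drop u := by
        rw [show pvIns s j = s.take j ++ ' ' :: s.drop j from rfl, ← hbeq]
        exact List.take_prefix _ _
      exact hpre.isInfix.trans (List.drop_suffix u o).isInfix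
    · rintro (hQ | ⟨j, hj1, hj2, hP⟩)
      · exact absurd ((PySem.Chars.isIn_iff_infix s o).mpr hQ) hin
      · obtain ⟨u, huu, hpre⟩ := (pvInfix_window (pvIns s j) o).mp hP
        rw [pvIns_length s j (le_trans hj2 hihn)] at huu
        refine ⟨(u : Int), ⟨by omega, by omega⟩, ?_⟩
        simp only [Int.toNat_natCast]
        have hjk : j ≤ pvLcp (o.drop u) s :=
          (pvLcp_prefix_iff (o.drop u) s j (le_trans hj2 hihn)).mp (pvTakePrefixIns s _ j hpre)
        set j' := min (pvLcp (o.drop u) s) hi with hj'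
        have hpre' : pvIns s j' <+: o.drop u := pvRaise (o.drop u) s hi j hihn hj2 hpre
        have hslice : PySem.List.slice o (some (u : Int)) (some ((u : Int) + (n : Int) + 1)) =
            (o.drop u).take (n + 1) := by
          rw [show ((u : Int) + (n : Int) + 1) = (u : Int) + ((n + 1 : Nat) : Int) by push_cast; ring]
          exact PySem.List.slice_natCast_add o u (n + 1)
        simp only [Bool.and_eq_true, decide_eq_true_eq, beq_iff_eq]
        refine ⟨by omega, ?_⟩
        rw [hslice]
        have heq : pvIns s j' = ((o.drop u).take ((pvIns s j').length)) :=
          List.prefix_iff_eq_take.mp hpre'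
        rw [pvIns_length s j' (le_trans (min_le_right _ _) hihn)] at heq
        exact heq.symm

-- ===== VERDICT (by name: the statement is the Claim_ definition above) =====
theorem split_verbatim_flagged_py_spec : Claim_equal_split_verbatim_flagged_py := by
  intro normalized_output normalized_sample mv ms _
  unfold Spec_split_verbatim_flagged_py split_verbatim_flagged_py split_verbatim_flagged_py_alt
  set o := normalized_output.toList with ho
  set s := normalized_sample.toList with hs
  by_cases h1 : (s.length : Int) < mv ∨ (o.length : Int) < mv
  · rw [if_pos h1, if_pos (by tauto)]
  by_cases h2 : 2 * ms > (s.length : Int)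
  · rw [if_neg h1, if_pos (by tauto)]
    rw [List.any_eq_false.mpr]
    intro i hi
    rw [PySem.List.mem_pyRange_one] at hi
    omega
  rw [not_or] at h1
  rw [if_neg (by rw [not_or]; exact h1), if_neg (by rw [not_or, not_or]; exact ⟨h1.1, h1.2, by omega⟩)]
  rw [Bool.eq_iff_iff]
  rw [pvA_iff o s mv ms (by omega) (by omega), pvB_iff o s ms (by omega)]
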